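-- pv_equiv track=rewrite | github.com/anamarijapapic/uup-vjezbe | kolokviji-i-ispiti-rjesenja/2kol-priprema-rijeseno/2kol-zima-2017-18-A-F-rijeseno/2kol-zima-2017-18-f-zad1.py | nedjeljivi
-- ===== SOURCE A (Python) =====
-- def nedjeljivi(lst):
--     nova = []
--     for i in lst: #secemo jedan po jedan el. liste
--         cnt = 0 #brojac na nula
--         for j in lst: #takoder secemo jedan po jedan el. liste
--             if i % j == 0: #ako je ostatak 0 znaci da su djeljivi, pa dizemo brojac
--                 cnt += 1
--         if cnt == 1: #onaj koji je djeljiv s "drugima" samo 1 put ide u listu jer je onda nedjeljiv,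
--         #znaci da mu je brojac osta na 1 jer se podilia sam sa sobom i to je to
--             nova.append(i)
--     return nova
-- ===== SOURCE B (Python) =====
-- def nedjeljivi(lst):
--     cnt = {}
--     for x in lst:
--         cnt[x] = cnt.get(x, 0) + 1
--     keep = {}
--     for v in cnt:
--         c = 0
--         for w in cnt:
--             if v % w == 0:
--                 c += cnt[w]
--         keep[v] = (c == 1)
--     return [i for i in lst if keep[i]]
-- ===== Notes on version B (the rewrite author's own statement) =====
-- stated objective: alternative
-- what changed: B builds a value->count dictionary once and decides the 'divisible by exactly one element' test once per DISTINCT value over distinct divisor candidates weighted by multiplicities, then filters the list by dictionary lookup, instead of A's full nested scan of the list for every element; same quadratic worst case when all values are distinct.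
import Mathlib
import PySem

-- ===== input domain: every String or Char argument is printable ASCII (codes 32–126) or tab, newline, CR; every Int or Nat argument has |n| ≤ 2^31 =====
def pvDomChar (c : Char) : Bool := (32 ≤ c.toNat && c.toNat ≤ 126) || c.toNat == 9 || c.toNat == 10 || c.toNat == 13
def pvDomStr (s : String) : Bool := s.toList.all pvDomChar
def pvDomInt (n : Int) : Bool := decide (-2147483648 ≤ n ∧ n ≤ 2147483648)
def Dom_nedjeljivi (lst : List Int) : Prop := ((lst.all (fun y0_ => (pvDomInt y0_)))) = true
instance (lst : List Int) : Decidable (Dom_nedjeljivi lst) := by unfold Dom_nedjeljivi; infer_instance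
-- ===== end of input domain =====

-- B replaces A's nested scan of the whole list by a counter dict built once: the divisibility
-- test runs once per pair of DISTINCT values, weighted by multiplicities.

-- ===== PORT A =====
-- literal port of A: for each i, count j in lst with i % j == 0; keep i iff the count is 1
def nedjeljivi (lst : List Int) : List Int :=
  lst.foldl (fun nova i =>
    let cnt := lst.foldl (fun cnt j => if PySem.Int.mod i j == 0 then cnt + 1 else cnt) (0 : Int)
    if cnt == 1 then nova ++ [i] else nova) []

-- ===== PORT B =====
-- literal port of Source B: build cnt = value counts, decide keep[v] once per distinct v, then filter lst
def nedjeljivi_alt (lst : List Int) : List Int :=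
  let cnt : PySem.Dict Int Int := lst.foldl (fun d x => d.insert x (d.getD x 0 + 1)) PySem.Dict.empty
  let keep : PySem.Dict Int Bool :=
    cnt.keys.foldl (fun kp v =>
      let c := cnt.keys.foldl (fun c w => if PySem.Int.mod v w == 0 then c + cnt.getD w 0 else c) (0 : Int)
      kp.insert v (c == 1)) PySem.Dict.empty
  lst.filter (fun i => (keep.get? i).getD false)

-- ===== PRECONDITION & SPEC =====
-- Pre_ excludes lists containing 0: there Python A (and B alike) raises ZeroDivisionError on i % 0.
def Pre_nedjeljivi (lst : List Int) : Prop := (0 : Int) ∉ lst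
instance (lst : List Int) : Decidable (Pre_nedjeljivi lst) := by unfold Pre_nedjeljivi; infer_instance
def pvWitness_nedjeljivi : List Int := [2, 3, 4]
def Spec_nedjeljivi (lst : List Int) (out : List Int) : Prop := out = nedjeljivi_alt lst
instance (lst : List Int) (out : List Int) : Decidable (Spec_nedjeljivi lst out) := by unfold Spec_nedjeljivi; infer_instance

-- ===== CLAIM (what is proved, stated in full; the proofs are below) =====
def Claim_equal_nedjeljivi : Prop := ∀ (lst : List Int), Dom_nedjeljivi lst → Pre_nedjeljivi lst → Spec_nedjeljivi lst (nedjeljivi lst)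

-- ===== LEMMAS AND PROOFS =====

theorem pv_sum_single (c : Int → Int) (x : Int) :
    ∀ keys : List Int, keys.Nodup → x ∈ keys →
      (keys.map (fun w => if w = x then c w else 0)).sum = c x := by
  intro keys
  induction keys with
  | nil => intro _ hx; simp at hx
  | cons k ks ih =>
    intro hn hx
    rcases List.nodup_cons.mp hn with ⟨hk, hks⟩
    by_cases hkx : k = x
    · subst hkx
      have hz : (ks.map (fun w => if w = k then c w else 0)).sum = 0 := by
        apply List.sum_eq_zero
        intro y hy
        rcases List.mem_map.mp hy with ⟨w, hw, rfl⟩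
        have : w ≠ k := fun h => hk (h ▸ hw)
        simp [this]
      simp [hz]
    · have hx' : x ∈ ks := by
        rcases List.mem_cons.mp hx with h | h
        · exact absurd h.symm hkx
        · exact h
      simp [ih hks hx']
      intro h; exact absurd h hkx

theorem pv_sum_count_eq_countP (p : Int → Bool) (keys : List Int) (hn : keys.Nodup) :
    ∀ lst : List Int, (∀ x ∈ lst, x ∈ keys) →
      (keys.map (fun w => if p w then (lst.count w : Int) else 0)).sum = (lst.countP p : Int) := by
  intro lst
  induction lst with
  | nil => intro _; simp
  | cons x t ih =>
    intro h
    have hx : x ∈ keys := h x (List.mem_cons_self)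
    have ht : ∀ y ∈ t, y ∈ keys := fun y hy => h y (List.mem_cons_of_mem _ hy)
    have hmap : (keys.map (fun w => if p w then ((x :: t).count w : Int) else 0))
        = keys.map (fun w => (if p w then (t.count w : Int) else 0)
            + (if w = x then (if p w then (1:Int) else 0) else 0)) := by
      apply List.map_congr_left
      intro w _
      by_cases hp : p w
      · by_cases hw : w = x
        · subst hw; simp [hp]
        · simp [hp, hw, List.count_cons]
          exact fun h => hw h.symm
      · simp [hp]
    rw [hmap, PySem.List.sum_map_add_int, ih ht,
        pv_sum_single (fun w => if p w then (1:Int) else 0) x keys hn hx]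
    rw [List.countP_cons]
    by_cases hp : p x <;> simp [hp]

theorem pv_getD_fold_insert (f : Int → Bool) :
    ∀ (keys : List Int) (d : PySem.Dict Int Bool) (x : Int), keys.Nodup →
      ((keys.foldl (fun kp v => kp.insert v (f v)) d).get? x).getD false =
        if x ∈ keys then f x else (d.get? x).getD false := by
  intro keys
  induction keys with
  | nil => intro d x _; simp
  | cons k ks ih =>
    intro d x hn
    rcases List.nodup_cons.mp hn with ⟨hk, hks⟩
    rw [List.foldl_cons, ih (d.insert k (f k)) x hks]
    by_cases hm : x ∈ ks
    · simp [hm, List.mem_cons]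
    · by_cases hkx : x = k
      · subst hkx
        simp [hm, PySem.Dict.get?_insert_self]
      · rw [PySem.Dict.get?_insert_of_ne (hne := hkx)]
        simp [hm, hkx]


theorem pv_A_eq_filter (lst : List Int) :
    nedjeljivi lst = lst.filter (fun i => ((lst.countP (fun j => PySem.Int.mod i j == 0) : Int) == 1)) := by
  show lst.foldl (fun nova i =>
      if (lst.foldl (fun cnt j => if PySem.Int.mod i j == 0 then cnt + 1 else cnt) (0 : Int)) == 1
      then nova ++ [i] else nova) [] = _
  rw [PySem.List.foldl_append_if_eq_filter]
  apply List.filter_congr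
  intro i _
  rw [PySem.List.foldl_if_add_one]
  simp

theorem pv_B_eq_filter (lst : List Int) :
    nedjeljivi_alt lst = lst.filter (fun i => ((lst.countP (fun j => PySem.Int.mod i j == 0) : Int) == 1)) := by
  unfold nedjeljivi_alt
  rw [PySem.Dict.foldl_insert_getD_add_one_eq_counter]
  apply List.filter_congr
  intro i hi
  have hkeys : (PySem.Dict.counter lst).keys = PySem.Set.ofList lst := PySem.Dict.keys_counter lst
  have hnd : (PySem.Set.ofList lst).Nodup := PySem.Set.nodup_ofList lst
  rw [hkeys]
  rw [pv_getD_fold_insert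
    (f := fun v => ((PySem.Set.ofList lst).foldl
       (fun c w => if PySem.Int.mod v w == 0 then c + (PySem.Dict.counter lst).getD w 0 else c) (0:Int) == 1))
    (PySem.Set.ofList lst) PySem.Dict.empty i hnd]
  have hmem : i ∈ PySem.Set.ofList lst := (PySem.Set.mem_ofList lst i).mpr hi
  rw [if_pos hmem]
  have h1 : List.foldl (fun c w => if PySem.Int.mod i w == 0 then c + (PySem.Dict.counter lst).getD w 0 else c)
        (0:Int) (PySem.Set.ofList lst)
      = List.foldl (fun c w => c + (if PySem.Int.mod i w == 0 then (lst.count w : Int) else 0))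
        (0:Int) (PySem.Set.ofList lst) :=
    PySem.List.foldl_congr_mem (PySem.Set.ofList lst) _ _ _ (by
      intro acc w hw
      by_cases hp : PySem.Int.mod i w == 0 <;> simp [hp, PySem.Dict.getD_counter])
  rw [h1, PySem.List.foldl_add]
  rw [pv_sum_count_eq_countP (fun j => PySem.Int.mod i j == 0) (PySem.Set.ofList lst) hnd lst
      (fun x hx => (PySem.Set.mem_ofList lst x).mpr hx)]
  simp

theorem pv_main (lst : List Int) : nedjeljivi lst = nedjeljivi_alt lst := by
  rw [pv_A_eq_filter, pv_B_eq_filter]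

-- ===== VERDICT (by name: the statement is the Claim_ definition above) =====
theorem nedjeljivi_spec : Claim_equal_nedjeljivi := by
  intro lst _ _
  unfold Spec_nedjeljivi
  exact pv_main lst
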